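-- pv_equiv track=rewrite | github.com/srsummerson/analysis | DMS_functions/dpca.py | join_labels
-- ===== SOURCE A (Python) =====
-- from itertools import chain, combinations
--
-- def join_labels(labels):
-- 	##assume the last index is 't' (time)
-- 	s = list(labels[:-1])
-- 	perms = chain.from_iterable(combinations(s, r) for r in range(len(s)+1))
-- 	perms = list(map(''.join,perms))[1:]
-- 	join = {}
-- 	for l in perms:
-- 		join[l+'t'] = [l,l+'t']
-- 	return join
-- ===== SOURCE B (Python) =====
-- def join_labels(labels):
--     # DP over the labels: _by_size(s)[r] holds the joined size-r subsets of s
--     # in index-lexicographic order; flatten gives the same order as A's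
--     # size-grouped itertools enumeration.
--     s = list(labels[:-1])
--     flat = [p for row in _by_size(s) for p in row][1:]
--     join = {}
--     for l in flat:
--         join[l + 't'] = [l, l + 't']
--     return join
--
-- def _by_size(s):
--     if not s:
--         return [['']]
--     rest = _by_size(s[1:])
--     x = s[0]
--     return [(([x + p for p in rest[r - 1]]) if r > 0 else []) +
--             (rest[r] if r < len(rest) else [])
--             for r in range(len(rest) + 1)]
-- ===== Notes on version B (the rewrite author's own statement) =====
-- stated objective: alternative
-- what changed: Replaces the size-by-size itertools.combinations + chain enumeration with a single Pascal-style recursion over the labels that builds all size classes of joined subset strings at once, then flattens; key order and the resulting dict are identical.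
import Mathlib
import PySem

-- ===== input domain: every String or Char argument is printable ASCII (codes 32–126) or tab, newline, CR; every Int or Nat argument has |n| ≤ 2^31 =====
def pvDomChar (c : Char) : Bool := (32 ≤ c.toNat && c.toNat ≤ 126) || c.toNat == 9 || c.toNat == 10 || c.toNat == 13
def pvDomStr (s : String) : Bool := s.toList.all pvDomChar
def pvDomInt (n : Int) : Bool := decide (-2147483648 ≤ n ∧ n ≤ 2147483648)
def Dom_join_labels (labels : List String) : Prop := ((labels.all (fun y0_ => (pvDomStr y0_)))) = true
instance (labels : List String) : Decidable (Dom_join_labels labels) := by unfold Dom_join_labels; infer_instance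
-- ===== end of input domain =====

-- B replaces the per-size itertools.combinations enumeration by one Pascal-style DP
-- over the labels that builds all size classes of joined subsets at once (objective:
-- alternative decomposition, same order, same result).

-- ===== PORT A =====
def join_labels (labels : List String) : List (String × List String) :=
  -- s = list(labels[:-1])
  let s := PySem.List.slice labels none (some (-1))
  -- perms = chain of combinations(s, r) for r in range(len(s)+1), each joined by ''
  let perms := (PySem.List.pyRange 0 ((s.length : Int) + 1) 1).flatMap
      (fun r => (PySem.List.combinations s r.toNat).map (fun c => PySem.Str.join "" c))
  -- perms = perms[1:]
  let perms := PySem.List.slice perms (some 1) none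
  -- join = {}; for l in perms: join[l+'t'] = [l, l+'t']
  (perms.foldl (fun d l => PySem.Dict.insert d (l ++ "t") [l, l ++ "t"]) PySem.Dict.empty).items

-- ===== PORT B =====
-- _by_size(s): rest = _by_size(s[1:]); row r = [s[0]+p for p in rest[r-1]] + rest[r]
def bySizeB (s : List String) : List (List String) :=
  match s with
  | [] => [[""]]
  | x :: xs =>
    let rest := bySizeB xs
    (PySem.List.pyRange 0 ((rest.length : Int) + 1) 1).map (fun r =>
      (if 0 < r then (PySem.List.pyGetD rest (r - 1) []).map (fun p => x ++ p) else []) ++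
      (if r < (rest.length : Int) then PySem.List.pyGetD rest r [] else []))

def join_labels_alt (labels : List String) : List (String × List String) :=
  -- s = list(labels[:-1])
  let s := PySem.List.slice labels none (some (-1))
  -- flat = [p for row in _by_size(s) for p in row][1:]
  let flat := PySem.List.slice ((bySizeB s).flatMap (fun row => row)) (some 1) none
  -- join = {}; for l in flat: join[l+'t'] = [l, l+'t']
  (flat.foldl (fun d l => PySem.Dict.insert d (l ++ "t") [l, l ++ "t"]) PySem.Dict.empty).items

-- ===== PRECONDITION & SPEC =====
def Spec_join_labels (labels : List String) (out : List (String × List String)) : Prop := out = join_labels_alt labels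
instance (labels : List String) (out : List (String × List String)) : Decidable (Spec_join_labels labels out) := by unfold Spec_join_labels; infer_instance

-- ===== CLAIM (what is proved, stated in full; the proofs are below) =====
def Claim_equal_join_labels : Prop := ∀ (labels : List String), Dom_join_labels labels → Spec_join_labels labels (join_labels labels)

-- ===== LEMMAS AND PROOFS =====

theorem joinStr_nil : PySem.Str.join "" [] = "" := by
  apply String.ext; simp [PySem.Str.toList_join, PySem.Chars.join_nil]

-- ''.join(x :: c) = x + ''.join(c)
theorem joinStr_cons (x : String) (c : List String) :
    PySem.Str.join "" (x :: c) = x ++ PySem.Str.join "" c := by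
  apply String.ext
  cases c with
  | nil => simp [PySem.Str.toList_join, PySem.Chars.join_nil, PySem.Chars.join_singleton]
  | cons y t =>
    simp [PySem.Str.toList_join, PySem.Chars.join_cons_cons]

-- B's DP table row r is exactly A's joined combinations of size r
theorem bySizeB_eq (s : List String) :
    bySizeB s = (List.range (s.length + 1)).map
      (fun r => (PySem.List.combinations s r).map (fun c => PySem.Str.join "" c)) := by
  induction s with
  | nil => simp [bySizeB, List.range_succ, PySem.List.combinations, joinStr_nil]
  | cons x xs ih =>
    simp only [bySizeB, ih, List.length_map, List.length_range]
    rw [show ((xs.length + 1 : Nat) : Int) + 1 = ((xs.length + 2 : Nat) : Int) by push_cast; ring,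
        PySem.List.pyRange_zero_natCast]
    rw [List.map_map]
    apply List.map_congr_left
    intro k hk
    simp only [List.mem_range] at hk
    simp only [Function.comp, PySem.List.pyGetD_natCast]
    cases k with
    | zero =>
      simp [PySem.List.combinations_zero]
    | succ j =>
      have h1 : ((j + 1 : Nat) : Int) - 1 = ((j : Nat) : Int) := by push_cast; ring
      rw [h1, PySem.List.pyGetD_natCast, PySem.List.getD_map_range _ _ j _ (by omega)]
      rw [PySem.List.combinations_cons_succ, List.map_append, List.map_map, List.map_map]
      rw [if_pos (show (0:Int) < ((j+1:Nat):Int) by exact_mod_cast Nat.succ_pos j)]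
      congr 1
      · simp [Function.comp, joinStr_cons]
      · by_cases h : j + 1 < xs.length + 1
        · rw [if_pos (by exact_mod_cast h), PySem.List.getD_map_range _ _ (j+1) _ h]
        · rw [if_neg (by exact_mod_cast h),
              PySem.List.combinations_eq_nil_of_length_lt xs (show xs.length < j + 1 by omega)]
          simp

-- A's chained enumeration flattens to B's DP table
theorem perms_eq (s : List String) :
    (PySem.List.pyRange 0 ((s.length : Int) + 1) 1).flatMap
      (fun r => (PySem.List.combinations s r.toNat).map (fun c => PySem.Str.join "" c))
      = (bySizeB s).flatMap (fun row => row) := by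
  rw [bySizeB_eq, List.flatMap_map,
      show ((s.length : Int) + 1) = ((s.length + 1 : Nat) : Int) by push_cast; ring,
      PySem.List.pyRange_zero_natCast, List.flatMap_map]
  simp

-- ===== VERDICT (by name: the statement is the Claim_ definition above) =====
theorem join_labels_spec : Claim_equal_join_labels := by
  intro labels _
  unfold Spec_join_labels join_labels join_labels_alt
  simp only [perms_eq]
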